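-- pv_equiv track=rewrite | github.com/chiarapepp/Quantum-Machine-Learning-Project | src/train.py | map_params_count_for_arch
-- ===== SOURCE A (Python) =====
-- import math
--
-- def _simple_params_per_pair(layer_type: str) -> int:
--     lt = layer_type.upper()
--     if lt == "ZZXXYY":
--         return 3
--     if lt in ("ZZXX", "XXYY", "ZZYY"):
--         return 2
--     raise ValueError(f"Unknown layer_type '{layer_type}'. Use: ZZXXYY, ZZXX, XXYY, ZZYY.")
--
-- def map_params_count_for_arch(arch_name: str, n_qubits: int, n_layers: int, layer_type: str = "XXYY") -> int:
--     """
--     Return expected number of scalar params.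
--     - Simple uses paper layer types (2 or 3 params per pair)
--     - TTN/MERA/QCNN use Rot+Rot+CNOT blocks (6 params per pair) as in your code
--     """
--     two_q_params = 6
--
--     if arch_name == "simple":
--         pairs = max(1, n_qubits // 2)
--         p_per_pair = _simple_params_per_pair(layer_type)
--         return n_layers * pairs * p_per_pair
--
--     elif arch_name == "ttn":
--         total_pairs = 0
--         active = n_qubits
--         while active > 1:
--             total_pairs += active // 2
--             active = math.ceil(active / 2)
--         return total_pairs * two_q_params
--
--     elif arch_name == "mera":
--         # your MERA code uses 2*n_layers*(n_qubits-1)/? blocks; we keep your previous convention: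
--         # n_layers * n_qubits blocks (approx). It's ok as long as consistent with architectures implementation.
--         return n_layers * n_qubits * two_q_params
--
--     elif arch_name == "qcnn":
--         total_pairs = 0
--         active = n_qubits
--         while active > 1:
--             total_pairs += active // 2
--             active = math.ceil(active / 2)
--         # two blocks per pair
--         return total_pairs * two_q_params * 2
--
--     else:
--         raise ValueError("Unknown arch: " + arch_name)
-- ===== SOURCE B (Python) =====
-- _PAIR_PARAMS = {"ZZXXYY": 3, "ZZXX": 2, "XXYY": 2, "ZZYY": 2}
--
-- def _pair_params(layer_type: str) -> int:
--     try:
--         return _PAIR_PARAMS[layer_type.upper()]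
--     except KeyError:
--         raise ValueError(f"Unknown layer_type '{layer_type}'. Use: ZZXXYY, ZZXX, XXYY, ZZYY.")
--
-- def map_params_count_for_arch(arch_name: str, n_qubits: int, n_layers: int, layer_type: str = "XXYY") -> int:
--     if arch_name == "simple":
--         return n_layers * max(1, n_qubits // 2) * _pair_params(layer_type)
--     if arch_name == "mera":
--         return n_layers * n_qubits * 6
--     if arch_name in ("ttn", "qcnn"):
--         # closed form: the halving loop's accumulated sum of active//2 equals max(0, n_qubits - 1)
--         return max(0, n_qubits - 1) * 6 * (2 if arch_name == "qcnn" else 1)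
--     raise ValueError("Unknown arch: " + arch_name)
-- ===== Notes on version B (the rewrite author's own statement) =====
-- stated objective: simpler
-- what changed: The ttn/qcnn halving while-loop summing active//2 is replaced by the closed form max(0, n_qubits - 1), and the layer-type dispatch becomes a dict lookup.
import Mathlib
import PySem

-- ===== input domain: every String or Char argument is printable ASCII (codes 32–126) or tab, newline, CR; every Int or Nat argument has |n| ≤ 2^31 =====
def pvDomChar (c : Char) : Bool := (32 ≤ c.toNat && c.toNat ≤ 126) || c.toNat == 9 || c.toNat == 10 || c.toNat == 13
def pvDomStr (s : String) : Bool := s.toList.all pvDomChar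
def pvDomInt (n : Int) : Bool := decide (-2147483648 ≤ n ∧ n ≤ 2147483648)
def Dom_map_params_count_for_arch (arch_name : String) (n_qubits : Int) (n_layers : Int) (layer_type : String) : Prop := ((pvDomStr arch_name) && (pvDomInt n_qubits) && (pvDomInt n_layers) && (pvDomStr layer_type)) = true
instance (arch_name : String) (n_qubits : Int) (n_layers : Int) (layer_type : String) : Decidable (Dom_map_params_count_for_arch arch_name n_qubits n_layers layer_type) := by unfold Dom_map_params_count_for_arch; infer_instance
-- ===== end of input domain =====

-- B replaces the ttn/qcnn halving while-loop by the closed form max(0, n_qubits - 1)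
-- and the layer-type dispatch by a dict lookup (objective: simpler).

-- ===== PORT A =====
-- A's helper _simple_params_per_pair; the final `raise ValueError` branch is excluded by Pre_,
-- the 0 there is never reached inside Pre_.
def pvSimpleParamsA (layer_type : String) : Int :=
  let lt := PySem.Str.upper layer_type
  if lt = "ZZXXYY" then 3
  else if lt = "ZZXX" ∨ lt = "XXYY" ∨ lt = "ZZYY" then 2
  else 0

-- A's `while active > 1: total += active // 2; active = math.ceil(active / 2)`.
-- math.ceil(active / 2) is exact on |active| ≤ 2^31 and equals floordiv (active + 1) 2.
def pvLoopA (active total : Int) : Int :=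
  if active > 1 then
    pvLoopA (PySem.Int.floordiv (active + 1) 2) (total + PySem.Int.floordiv active 2)
  else total
termination_by active.toNat
decreasing_by
  rename_i h
  rw [PySem.Int.floordiv_eq_ediv_of_pos (by omega)]
  omega

def map_params_count_for_arch (arch_name : String) (n_qubits : Int) (n_layers : Int) (layer_type : String) : Int :=
  let two_q_params : Int := 6
  if arch_name = "simple" then
    let pairs := max 1 (PySem.Int.floordiv n_qubits 2)
    let p_per_pair := pvSimpleParamsA layer_type
    n_layers * pairs * p_per_pair
  else if arch_name = "ttn" then
    pvLoopA n_qubits 0 * two_q_params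
  else if arch_name = "mera" then
    n_layers * n_qubits * two_q_params
  else if arch_name = "qcnn" then
    pvLoopA n_qubits 0 * two_q_params * 2
  else 0  -- raise ValueError, excluded by Pre_

-- ===== PORT B =====
def pvPairParamsB : PySem.Dict String Int :=
  PySem.Dict.ofList [("ZZXXYY", 3), ("ZZXX", 2), ("XXYY", 2), ("ZZYY", 2)]

-- B's helper _pair_params; the KeyError→ValueError path is excluded by Pre_.
def pvPairParamsLookupB (layer_type : String) : Int :=
  (PySem.Dict.get? pvPairParamsB (PySem.Str.upper layer_type)).getD 0

def map_params_count_for_arch_alt (arch_name : String) (n_qubits : Int) (n_layers : Int) (layer_type : String) : Int :=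
  if arch_name = "simple" then
    n_layers * max 1 (PySem.Int.floordiv n_qubits 2) * pvPairParamsLookupB layer_type
  else if arch_name = "mera" then
    n_layers * n_qubits * 6
  else if arch_name = "ttn" ∨ arch_name = "qcnn" then
    max 0 (n_qubits - 1) * 6 * (if arch_name = "qcnn" then 2 else 1)
  else 0  -- raise ValueError, excluded by Pre_

-- ===== PRECONDITION & SPEC =====
-- Pre_ excludes exactly the inputs on which A raises ValueError: an unknown arch_name, or
-- arch_name = "simple" with a layer_type whose upper-case form is not one of the four known ones.
def Pre_map_params_count_for_arch (arch_name : String) (n_qubits : Int) (n_layers : Int) (layer_type : String) : Prop :=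
  (arch_name = "simple" ∧
     (PySem.Str.upper layer_type = "ZZXXYY" ∨ PySem.Str.upper layer_type = "ZZXX" ∨
      PySem.Str.upper layer_type = "XXYY" ∨ PySem.Str.upper layer_type = "ZZYY")) ∨
  arch_name = "ttn" ∨ arch_name = "mera" ∨ arch_name = "qcnn"
instance (arch_name : String) (n_qubits : Int) (n_layers : Int) (layer_type : String) : Decidable (Pre_map_params_count_for_arch arch_name n_qubits n_layers layer_type) := by unfold Pre_map_params_count_for_arch; infer_instance

def pvWitness_map_params_count_for_arch : String × Int × Int × String := ("ttn", 8, 2, "XXYY")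

def Spec_map_params_count_for_arch (arch_name : String) (n_qubits : Int) (n_layers : Int) (layer_type : String) (out : Int) : Prop := out = map_params_count_for_arch_alt arch_name n_qubits n_layers layer_type
instance (arch_name : String) (n_qubits : Int) (n_layers : Int) (layer_type : String) (out : Int) : Decidable (Spec_map_params_count_for_arch arch_name n_qubits n_layers layer_type out) := by unfold Spec_map_params_count_for_arch; infer_instance

-- ===== CLAIM (what is proved, stated in full; the proofs are below) =====
def Claim_equal_map_params_count_for_arch : Prop := ∀ (arch_name : String) (n_qubits : Int) (n_layers : Int) (layer_type : String), Dom_map_params_count_for_arch arch_name n_qubits n_layers layer_type → Pre_map_params_count_for_arch arch_name n_qubits n_layers layer_type → Spec_map_params_count_for_arch arch_name n_qubits n_layers layer_type (map_params_count_for_arch arch_name n_qubits n_layers layer_type)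

-- ===== LEMMAS AND PROOFS =====

-- the halving loop computes total + max 0 (active - 1)
theorem pvLoopA_eq (active total : Int) : pvLoopA active total = total + max 0 (active - 1) := by
  induction active, total using pvLoopA.induct with
  | case1 a t h ih =>
    rw [pvLoopA, if_pos h, ih,
        PySem.Int.floordiv_eq_ediv_of_pos (a := a + 1) (by omega),
        PySem.Int.floordiv_eq_ediv_of_pos (a := a) (by omega)]
    omega
  | case2 a t h =>
    rw [pvLoopA, if_neg h]
    omega

theorem pvSimpleParams_agree (layer_type : String)
    (h : PySem.Str.upper layer_type = "ZZXXYY" ∨ PySem.Str.upper layer_type = "ZZXX" ∨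
         PySem.Str.upper layer_type = "XXYY" ∨ PySem.Str.upper layer_type = "ZZYY") :
    pvSimpleParamsA layer_type = pvPairParamsLookupB layer_type := by
  unfold pvSimpleParamsA pvPairParamsLookupB
  rcases h with h | h | h | h <;> rw [h] <;> rfl

-- ===== VERDICT (by name: the statement is the Claim_ definition above) =====
theorem map_params_count_for_arch_spec : Claim_equal_map_params_count_for_arch := by
  intro arch n l lt _ hpre
  unfold Spec_map_params_count_for_arch map_params_count_for_arch map_params_count_for_arch_alt
  rcases hpre with ⟨hs, hlt⟩ | h | h | h
  · simp only [hs, pvSimpleParams_agree lt hlt, if_true]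
  · subst h; simp [pvLoopA_eq]
  · subst h; simp
  · subst h; simp [pvLoopA_eq]
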